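-- pv_equiv track=rewrite | github.com/aganezov/B2_CIGARCO | cigarco/cigar_utils.py | is_valid_cigar
-- ===== SOURCE A (Python) =====
-- ALLOWED_OPERATIONS = {'M', "I", "D", "N", "S", "H", "P", "=", "X"}
--
-- def is_valid_cigar(cigar: str) -> bool:
--     """
--     A CIGAR string is valid if it is non-empty string with alternating numbers and supporting single character operations
--     Works in a single pass with O(n) complexity, where n is the size of the input string; requires O(1) extra memory.
--
--     Args:
--         cigar (str): a CIGAR encoded (doc: https://samtools.github.io/hts-specs/SAMv1.pdf , page 7) alignment string
--
--     Returns: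
--         valid (bool): a flag indicating if a cigar string is valid one.
--
--     Examples:
--         >>> is_valid_cigar("M")
--         False
--
--         >>> is_valid_cigar("10")
--         False
--
--         >>> is_valid_cigar("10M10")
--         False
--
--         >>> is_valid_sigar("10M10D")
--         True
--     """
--     # can't be an empty one
--     if not cigar:
--         return False
--     prev = None
--     for char in cigar:
--
--         # Every entry has to be either a digit or a supporter single-char encoded operation
--         if not (char.isdigit() or char in ALLOWED_OPERATIONS):
--             return False
--
--         # CIGAR string must start with a digit
--         if char in ALLOWED_OPERATIONS and (not prev or not prev.isdigit()):
--             return False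
--
--         prev = char
--
--     # CIGAR string must end with an operation
--     if prev not in ALLOWED_OPERATIONS:
--         return False
--
--     return True
-- ===== SOURCE B (Python) =====
-- ALLOWED_OPERATIONS = {'M', "I", "D", "N", "S", "H", "P", "=", "X"}
--
-- def is_valid_cigar(cigar: str) -> bool:
--     # Run-based parser: repeatedly consume a non-empty digit run followed by
--     # exactly one allowed operation character, until the string is exhausted.
--     n = len(cigar)
--     if n == 0:
--         return False
--     i = 0
--     while i < n:
--         j = i
--         while j < n and cigar[j].isdigit():
--             j += 1
--         if j == i or j == n or cigar[j] not in ALLOWED_OPERATIONS: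
--             return False
--         i = j + 1
--     return True
-- ===== Notes on version B (the rewrite author's own statement) =====
-- stated objective: alternative
-- what changed: Replaced the per-character state machine tracking the previous character with a run-based parser that repeatedly consumes a non-empty digit run followed by one allowed operation character.
import Mathlib
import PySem

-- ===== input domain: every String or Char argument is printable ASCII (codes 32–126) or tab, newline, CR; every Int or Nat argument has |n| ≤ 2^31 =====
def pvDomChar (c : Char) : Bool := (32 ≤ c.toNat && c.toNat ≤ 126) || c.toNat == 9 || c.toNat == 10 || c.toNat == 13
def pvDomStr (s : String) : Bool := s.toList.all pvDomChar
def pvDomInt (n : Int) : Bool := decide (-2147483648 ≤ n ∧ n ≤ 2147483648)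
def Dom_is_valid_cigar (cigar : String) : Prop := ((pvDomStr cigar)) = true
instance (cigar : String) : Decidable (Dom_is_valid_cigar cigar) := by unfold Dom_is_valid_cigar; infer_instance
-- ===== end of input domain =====

-- B replaces A's per-character state machine (tracking the previous character) with a
-- run-based parser consuming a non-empty digit run then one operation char per step
-- (objective: alternative decomposition, same O(n) cost).

-- ===== PORT A =====
def pvAllowedOps : List Char := ['M', 'I', 'D', 'N', 'S', 'H', 'P', '=', 'X']

-- the for-loop of A: prev is the previous character (None before the first)
def pvGoA (prev : Option Char) : List Char → Bool
  | [] =>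
      -- final check: `if prev not in ALLOWED_OPERATIONS: return False` then `return True`
      match prev with
      | none => false
      | some p => pvAllowedOps.contains p
  | c :: rest =>
      if !(PySem.Chars.isdigit c || pvAllowedOps.contains c) then false
      else if pvAllowedOps.contains c &&
              (match prev with | none => true | some p => !PySem.Chars.isdigit p) then false
      else pvGoA (some c) rest

def is_valid_cigar (cigar : String) : Bool :=
  if cigar.toList = [] then false else pvGoA none cigar.toList

-- ===== PORT B =====
-- the outer while-loop of B, on the suffix cigar[i:]; the inner while (digit scan) is dropWhile
def pvRunB : List Char → Bool
  | [] => true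
  | c :: cs =>
      if !PySem.Chars.isdigit c then false        -- j == i: empty digit run
      else
        match h : cs.dropWhile PySem.Chars.isdigit with
        | [] => false                              -- j == n: no operation char
        | op :: rest => pvAllowedOps.contains op && pvRunB rest
termination_by l => l.length
decreasing_by
  have h1 : (cs.dropWhile PySem.Chars.isdigit).length ≤ cs.length := List.length_dropWhile_le _ _
  have h2 : (cs.dropWhile PySem.Chars.isdigit).length = rest.length + 1 := by rw [h]; rfl
  simp; omega

def is_valid_cigar_alt (cigar : String) : Bool :=
  if cigar.toList = [] then false else pvRunB cigar.toList

-- ===== PRECONDITION & SPEC =====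
def Spec_is_valid_cigar (cigar : String) (out : Bool) : Prop := out = is_valid_cigar_alt cigar
instance (cigar : String) (out : Bool) : Decidable (Spec_is_valid_cigar cigar out) := by unfold Spec_is_valid_cigar; infer_instance

-- ===== CLAIM (what is proved, stated in full; the proofs are below) =====
def Claim_equal_is_valid_cigar : Prop := ∀ (cigar : String), Dom_is_valid_cigar cigar → Spec_is_valid_cigar cigar (is_valid_cigar cigar)

-- ===== LEMMAS AND PROOFS =====

-- unfolding equations for the well-founded pvRunB
theorem pvRunB_nil : pvRunB [] = true := by rw [pvRunB]

theorem pvRunB_cons (c : Char) (cs : List Char) :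
    pvRunB (c :: cs) =
      (if !PySem.Chars.isdigit c then false
       else
        match cs.dropWhile PySem.Chars.isdigit with
        | [] => false
        | op :: rest => pvAllowedOps.contains op && pvRunB rest) := by
  rw [pvRunB]
  rcases h : cs.dropWhile PySem.Chars.isdigit with _ | ⟨op, rest⟩ <;> simp

-- no character is both a digit and an allowed operation
theorem pvNotBoth (c : Char) (h : c ∈ pvAllowedOps) : PySem.Chars.isdigit c = false := by
  simp [pvAllowedOps] at h
  rcases h with h | h | h | h | h | h | h | h | h <;> subst h <;> decide

theorem pvDigitNotOp (c : Char) (h : PySem.Chars.isdigit c = true) : c ∉ pvAllowedOps := by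
  intro hm
  rw [pvNotBoth c hm] at h
  exact absurd h (by simp)

-- A in the "previous char is a digit" state: skip the digit run, then demand an operation
theorem pvGoA_digit (l : List Char) (p : Char) (hp : PySem.Chars.isdigit p = true) :
    pvGoA (some p) l =
      (match l.dropWhile PySem.Chars.isdigit with
       | [] => false
       | op :: r => pvAllowedOps.contains op && pvGoA (some op) r) := by
  induction l generalizing p with
  | nil => simp [pvGoA, pvDigitNotOp p hp]
  | cons c t ih =>
    cases hc : PySem.Chars.isdigit c
    · simp [pvGoA, hc, hp]
    · simp [pvGoA, hc, pvDigitNotOp c hc]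
      simpa [List.contains_eq_mem] using ih c hc

-- A in the "previous char is an allowed operation" state equals B's run parser
theorem pvGoA_op (l : List Char) : ∀ (p : Char), p ∈ pvAllowedOps →
    pvGoA (some p) l = pvRunB l := by
  induction hl : l.length using Nat.strong_induction_on generalizing l with
  | _ n ih =>
  intro p hp
  cases l with
  | nil => simp [pvGoA, pvRunB_nil, hp]
  | cons c t =>
    cases hc : PySem.Chars.isdigit c
    · by_cases hoc : c ∈ pvAllowedOps
      · simp [pvGoA, pvRunB_cons, hc, hoc, pvNotBoth p hp]
      · simp [pvGoA, pvRunB_cons, hc, hoc]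
    · have hLHS : pvGoA (some p) (c :: t) = pvGoA (some c) t := by
        simp [pvGoA, hc, pvDigitNotOp c hc]
      rw [hLHS, pvGoA_digit t c hc, pvRunB_cons]
      cases hdw : t.dropWhile PySem.Chars.isdigit with
      | nil => simp [hc]
      | cons op r =>
        have hlen : r.length < n := by
          have h1 : (t.dropWhile PySem.Chars.isdigit).length ≤ t.length :=
            List.length_dropWhile_le _ _
          have h2 : (t.dropWhile PySem.Chars.isdigit).length = r.length + 1 := by
            rw [hdw]; rfl
          subst hl; simp; omega
        simp only [hc, Bool.not_true, Bool.false_eq_true, if_false]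
        by_cases hop : op ∈ pvAllowedOps
        · simp only [ih r.length hlen r rfl op hop]
        · simp [hop]

-- the None start state behaves like an operation start state on a non-empty string
theorem pvGoA_none (c : Char) (t : List Char) :
    pvGoA none (c :: t) = pvGoA (some 'M') (c :: t) := by
  simp [pvGoA, (by decide : PySem.Chars.isdigit 'M' = false)]

-- ===== VERDICT (by name: the statement is the Claim_ definition above) =====
theorem is_valid_cigar_spec : Claim_equal_is_valid_cigar := by
  intro cigar _
  unfold Spec_is_valid_cigar is_valid_cigar is_valid_cigar_alt
  cases hl : cigar.toList with
  | nil => simp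
  | cons c t =>
    simp only [if_neg (by simp : ¬(c :: t = ([] : List Char)))]
    rw [pvGoA_none, pvGoA_op (c :: t) 'M' (by decide)]
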